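-- pv_equiv track=rewrite | github.com/mkdev9/Ownpypractice | python_practices_100.py | sort_columns_by_first_row
-- ===== SOURCE A (Python) =====
-- def sort_columns_by_first_row(matrix):
--     if not matrix:
--         return matrix
--
--     # Get column indices sorted by first row values
--     cols = len(matrix[0])
--     col_indices = sorted(range(cols), key=lambda x: matrix[0][x])
--
--     # Rearrange columns
--     result = []
--     for row in matrix:
--         result.append([row[i] for i in col_indices])
--
--     return result
-- ===== SOURCE B (Python) =====
-- def sort_columns_by_first_row(matrix):
--     if not matrix:
--         return matrix
--     cols = sorted(zip(*matrix), key=lambda c: c[0])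
--     return [list(r) for r in zip(*cols)] if cols else [[] for _ in matrix]
-- ===== Notes on version B (the rewrite author's own statement) =====
-- stated objective: idiomatic
-- what changed: B transposes the matrix with zip(*...), stably sorts the column tuples by their first element, and transposes back, instead of sorting a permutation of column indices and rebuilding every row by indexed lookups.
import Mathlib
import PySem

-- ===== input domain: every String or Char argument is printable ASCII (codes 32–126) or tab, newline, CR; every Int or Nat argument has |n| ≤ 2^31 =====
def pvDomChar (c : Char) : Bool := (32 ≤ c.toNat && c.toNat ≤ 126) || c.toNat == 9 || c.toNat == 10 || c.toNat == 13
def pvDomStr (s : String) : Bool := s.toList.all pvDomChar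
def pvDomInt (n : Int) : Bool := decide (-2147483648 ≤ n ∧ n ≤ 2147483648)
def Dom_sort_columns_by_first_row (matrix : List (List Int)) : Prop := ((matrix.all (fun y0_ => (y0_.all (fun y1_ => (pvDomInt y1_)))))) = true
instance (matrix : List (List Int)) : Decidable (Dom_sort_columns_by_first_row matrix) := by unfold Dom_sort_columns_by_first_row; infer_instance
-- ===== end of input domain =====

-- B reorders the columns by transposing, stably sorting the column tuples by first element,
-- and transposing back, instead of sorting column indices and rebuilding rows by lookups (idiomatic).


-- ===== PORT A =====
-- 'row[i]' is ported as (pyGet? row i).getD 0; on inputs inside Pre_ every such index is in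
-- range, so the default is never taken (where Python would raise IndexError, Pre_ excludes).
def sort_columns_by_first_row (matrix : List (List Int)) : List (List Int) :=
  if matrix = [] then matrix
  else
    let cols : Int := (matrix.headD []).length
    let col_indices :=
      PySem.List.sorted (PySem.List.pyRange 0 cols 1)
        (fun x => (PySem.List.pyGet? (matrix.headD []) x).getD 0) false
    matrix.foldl
      (fun result row => result ++ [col_indices.map (fun i => (PySem.List.pyGet? row i).getD 0)]) []

-- ===== PORT B =====
-- zip(*rows): repeatedly take all heads until some list is exhausted (Python zip truncates).
def zipStar (rows : List (List Int)) : List (List Int) :=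
  if h : rows = [] ∨ rows.any (fun r => r.isEmpty) then []
  else (rows.map (fun r => r.headD 0)) :: zipStar (rows.map (fun r => r.tail))
termination_by ((rows.headD []).length)
decreasing_by
  rcases not_or.mp h with ⟨h1, h2⟩
  cases rows with
  | nil => exact absurd rfl h1
  | cons r rs =>
    simp only [List.map_cons, List.headD_cons]
    have hr : r ≠ [] := by
      intro hre; exact h2 (by simp [hre])
    cases r with
    | nil => exact absurd rfl hr
    | cons a t => simp

def sort_columns_by_first_row_alt (matrix : List (List Int)) : List (List Int) :=
  if matrix = [] then matrix
  else
    let cols := PySem.List.sorted (zipStar matrix) (fun c => c.headD 0) false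
    if cols = [] then matrix.map (fun _ => []) else zipStar cols

-- ===== PRECONDITION & SPEC =====
-- Pre_ excludes exactly the inputs where some row is shorter than the first row, on which
-- A raises IndexError while indexing that row; everywhere A returns, Pre_ holds.
def Pre_sort_columns_by_first_row (matrix : List (List Int)) : Prop :=
  ∀ row ∈ matrix, (matrix.headD []).length ≤ row.length
instance (matrix : List (List Int)) : Decidable (Pre_sort_columns_by_first_row matrix) := by
  unfold Pre_sort_columns_by_first_row; infer_instance
def pvWitness_sort_columns_by_first_row : List (List Int) := [[2, 1], [3, 4]]

def Spec_sort_columns_by_first_row (matrix : List (List Int)) (out : List (List Int)) : Prop :=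
  out = sort_columns_by_first_row_alt matrix
instance (matrix : List (List Int)) (out : List (List Int)) : Decidable (Spec_sort_columns_by_first_row matrix out) := by
  unfold Spec_sort_columns_by_first_row; infer_instance

-- ===== CLAIM (what is proved, stated in full; the proofs are below) =====
def Claim_equal_sort_columns_by_first_row : Prop :=
  ∀ (matrix : List (List Int)), Dom_sort_columns_by_first_row matrix →
    Pre_sort_columns_by_first_row matrix →
    Spec_sort_columns_by_first_row matrix (sort_columns_by_first_row matrix)

-- ===== LEMMAS AND PROOFS =====

theorem pv_foldl_append {α β : Type} (f : α → β) :
    ∀ (l : List α) (acc : List β),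
      l.foldl (fun a r => a ++ [f r]) acc = acc ++ l.map f := by
  intro l
  induction l with
  | nil => simp
  | cons x xs ih => intro acc; simp [ih]

theorem pv_insertBy_map {α β : Type} (f : α → β) (bf : α → α → Bool) (bg : β → β → Bool)
    (h : ∀ a b, bg (f a) (f b) = bf a b) (x : α) :
    ∀ ys, (PySem.List.insertBy bf x ys).map f = PySem.List.insertBy bg (f x) (ys.map f) := by
  intro ys
  induction ys with
  | nil => simp [PySem.List.insertBy]
  | cons y t ih =>
    simp only [PySem.List.insertBy, List.map_cons, h]
    by_cases hb : bf x y
    · simp [hb]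
    · simp [hb, ih]

theorem pv_sorted_map {α β : Type} (f : α → β) (g : β → Int) (l : List α) :
    PySem.List.sorted (l.map f) g false
      = (PySem.List.sorted l (fun a => g (f a)) false).map f := by
  rw [PySem.List.sorted_eq_foldl_insertBy, PySem.List.sorted_eq_foldl_insertBy, List.foldl_map]
  suffices hgen : ∀ (l : List α) (acc : List α),
      l.foldl (fun acc x => PySem.List.insertBy (fun a b => decide (g a < g b)) (f x) acc) (acc.map f)
        = (l.foldl (fun acc x => PySem.List.insertBy (fun a b => decide (g (f a) < g (f b))) x acc) acc).map f by
    simpa using hgen l []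
  intro l'
  induction l' with
  | nil => simp
  | cons x xs ih =>
    intro acc
    simp only [List.foldl_cons]
    rw [← pv_insertBy_map f (fun a b => decide (g (f a) < g (f b))) (fun a b => decide (g a < g b)) (by intro a b; rfl) x acc]
    exact ih _

theorem pv_zipStar_eq (n : Nat) :
    ∀ (rows : List (List Int)), rows ≠ [] → (∀ r ∈ rows, n ≤ r.length) →
      (rows.headD []).length = n →
      zipStar rows = (List.range n).map (fun j => rows.map (fun r => r.getD j 0)) := by
  induction n with
  | zero =>
    intro rows hne _ hhead
    cases rows with
    | nil => exact absurd rfl hne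
    | cons r rs =>
      have hr : r = [] := by simpa using hhead
      rw [zipStar]
      simp [hr]
  | succ n ih =>
    intro rows hne hlen hhead
    have hnoempty : rows.any (fun r => r.isEmpty) = false := by
      simp only [List.any_eq_false]
      intro r hr
      have := hlen r hr
      simp only [List.isEmpty_iff]
      intro hre; rw [hre] at this; simp at this
    rw [zipStar]
    simp only [hne, hnoempty, or_self, Bool.false_eq_true, dite_false]
    have htne : rows.map (fun r => r.tail) ≠ [] := by
      simpa using hne
    have htlen : ∀ r ∈ rows.map (fun r => r.tail), n ≤ r.length := by
      intro r hr
      rcases List.mem_map.mp hr with ⟨r0, hr0, rfl⟩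
      have := hlen r0 hr0
      simp [List.length_tail]; omega
    have hthead : ((rows.map (fun r => r.tail)).headD []).length = n := by
      cases rows with
      | nil => exact absurd rfl hne
      | cons r rs =>
        simp only [List.map_cons, List.headD_cons]
        have : r.tail.length = r.length - 1 := List.length_tail
        simp only [List.headD_cons] at hhead
        omega
    rw [ih _ htne htlen hthead]
    rw [List.range_succ_eq_map]
    simp only [List.map_cons, List.map_map]
    congr 1
    · apply List.map_congr_left
      intro r hr
      have hrne : r ≠ [] := by
        intro hre
        have := hlen r hr; rw [hre] at this; simp at this
      cases r with
      | nil => exact absurd rfl hrne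
      | cons a t => simp
    · apply List.map_congr_left
      intro j _
      simp only [Function.comp, List.map_map]
      apply List.map_congr_left
      intro r hr
      have hrne : r ≠ [] := by
        intro hre
        have := hlen r hr; rw [hre] at this; simp at this
      cases r with
      | nil => exact absurd rfl hrne
      | cons a t => simp

-- ===== VERDICT (by name: the statement is the Claim_ definition above) =====
theorem sort_columns_by_first_row_spec : Claim_equal_sort_columns_by_first_row := by
  intro matrix _ hpre
  unfold Spec_sort_columns_by_first_row
  cases matrix with
  | nil => simp [sort_columns_by_first_row, sort_columns_by_first_row_alt]
  | cons r0 rest =>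
    by_cases h0 : r0 = []
    · -- empty first row: no columns, both sides return one empty list per row
      subst h0
      have hz : zipStar (([] : List Int) :: rest) = [] := by
        rw [zipStar]; simp
      have hB : sort_columns_by_first_row_alt (([] : List Int) :: rest)
          = (([] : List Int) :: rest).map (fun _ => []) := by
        simp only [sort_columns_by_first_row_alt, hz]
        rw [if_neg (List.cons_ne_nil _ _)]
        have h2 : PySem.List.sorted ([] : List (List Int)) (fun c => c.headD 0) false = [] := rfl
        rw [h2, if_pos rfl]
      rw [hB]
      simp only [sort_columns_by_first_row, List.headD_cons, List.length_nil, Nat.cast_zero]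
      rw [if_neg (List.cons_ne_nil _ _), pv_foldl_append]
      have h1 : PySem.List.pyRange 0 0 1 = [] := by decide
      rw [h1]
      have h2 : PySem.List.sorted ([] : List Int)
          (fun x => (PySem.List.pyGet? ([] : List Int) x).getD 0) false = [] := rfl
      rw [h2]
      simp
    · -- main case: nonempty first row of length n, every row at least that long
      have hn : 0 < r0.length := List.length_pos_iff.mpr h0
      have hlen : ∀ r ∈ r0 :: rest, r0.length ≤ r.length := by
        intro r hr
        simpa using hpre r hr
      have hσlen : (PySem.List.sorted (List.range r0.length) (fun j => r0.getD j 0) false).length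
          = r0.length := by
        rw [PySem.List.length_sorted, List.length_range]
      have hσne : PySem.List.sorted (List.range r0.length) (fun j => r0.getD j 0) false ≠ [] := by
        intro hnil; rw [hnil] at hσlen; simp at hσlen; omega
      -- A-side: result is each row rearranged along the sorted index list
      have hA : sort_columns_by_first_row (r0 :: rest)
          = (r0 :: rest).map (fun row =>
              (PySem.List.sorted (List.range r0.length) (fun j => r0.getD j 0) false).map
                (fun j => row.getD j 0)) := by
        simp only [sort_columns_by_first_row, List.headD_cons]
        rw [if_neg (List.cons_ne_nil _ _), pv_foldl_append]
        simp only [List.nil_append]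
        have hrange : PySem.List.pyRange 0 (r0.length : Int) 1
            = (List.range r0.length).map (fun (k : Nat) => (k : Int)) := by
          rw [PySem.List.pyRange_one]
          simp only [Int.sub_zero, Int.toNat_natCast, zero_add]
        rw [hrange,
          pv_sorted_map (fun (k : Nat) => (k : Int)) (fun x => (PySem.List.pyGet? r0 x).getD 0)
            (List.range r0.length)]
        have hkey : (fun (a : Nat) => (PySem.List.pyGet? r0 ((a : Nat) : Int)).getD 0)
            = (fun j => r0.getD j 0) := by
          funext j
          simp [PySem.List.pyGet?_natCast, List.getD_eq_getElem?_getD]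
        rw [hkey]
        apply List.map_congr_left
        intro row _
        rw [List.map_map]
        apply List.map_congr_left
        intro j _
        simp [PySem.List.pyGet?_natCast, List.getD_eq_getElem?_getD]
      -- B-side: transpose, sort the columns, transpose back
      have hcols : zipStar (r0 :: rest)
          = (List.range r0.length).map (fun j => (r0 :: rest).map (fun r => r.getD j 0)) :=
        pv_zipStar_eq r0.length (r0 :: rest) (List.cons_ne_nil _ _) hlen (by simp)
      have hsortcols : PySem.List.sorted (zipStar (r0 :: rest)) (fun c => c.headD 0) false
          = (PySem.List.sorted (List.range r0.length) (fun j => r0.getD j 0) false).map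
              (fun j => (r0 :: rest).map (fun r => r.getD j 0)) := by
        rw [hcols,
          pv_sorted_map (fun j => (r0 :: rest).map (fun r => r.getD j 0)) (fun c => c.headD 0)
            (List.range r0.length)]
        simp only [List.map_cons, List.headD_cons]
      have hB : sort_columns_by_first_row_alt (r0 :: rest)
          = (List.range (r0 :: rest).length).map (fun i =>
              (PySem.List.sorted (List.range r0.length) (fun j => r0.getD j 0) false).map
                (fun j => ((r0 :: rest).map (fun r => r.getD j 0)).getD i 0)) := by
        simp only [sort_columns_by_first_row_alt]
        rw [if_neg (List.cons_ne_nil _ _), hsortcols]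
        have hne2 : (PySem.List.sorted (List.range r0.length) (fun j => r0.getD j 0) false).map
            (fun j => (r0 :: rest).map (fun r => r.getD j 0)) ≠ [] := by
          simp only [ne_eq, List.map_eq_nil_iff]
          exact hσne
        have hlen2 : ∀ c ∈ (PySem.List.sorted (List.range r0.length) (fun j => r0.getD j 0) false).map
            (fun j => (r0 :: rest).map (fun r => r.getD j 0)), (r0 :: rest).length ≤ c.length := by
          intro c hc
          rcases List.mem_map.mp hc with ⟨j, _, rfl⟩
          simp
        have hhead2 : (((PySem.List.sorted (List.range r0.length) (fun j => r0.getD j 0) false).map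
            (fun j => (r0 :: rest).map (fun r => r.getD j 0))).headD []).length
              = (r0 :: rest).length := by
          rcases List.exists_cons_of_ne_nil hσne with ⟨j, t, hjt⟩
          rw [hjt]
          simp
        rw [if_neg hne2, pv_zipStar_eq (r0 :: rest).length _ hne2 hlen2 hhead2]
        apply List.map_congr_left
        intro i _
        simp [Function.comp]
      -- combine: both sides are row i ↦ [row i at column j for j in the sorted index list]
      rw [hA, hB]
      apply List.ext_getElem
      · simp
      · intro i hi1 hi2
        rw [List.getElem_map, List.getElem_map, List.getElem_range]
        apply List.map_congr_left
        intro j _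
        have hi' : i < (r0 :: rest).length := by simpa using hi1
        simp only [List.getD_eq_getElem?_getD, List.getElem?_map,
          List.getElem?_eq_getElem hi', Option.map_some, Option.getD_some]
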